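-- pv_equiv track=rewrite | github.com/theghostshinobi/RaceHunter | utils.py | find_common_substrings
-- ===== SOURCE A (Python) =====
-- from typing import Dict, Tuple, List, Optional
--
-- def find_common_substrings(strings: List[str], min_length: int = 10) -> List[str]:
--     """
--     Find common substrings across multiple strings
--     Useful for identifying patterns in responses
--     """
--     if not strings:
--         return []
--     if len(strings) == 1:
--         return [strings[0]]
--
--     common = set()
--     first = strings[0]
--
--     for i in range(len(first) - min_length + 1):
--         substring = first[i:i + min_length]
--         if all(substring in s for s in strings[1:]):
--             common.add(substring)
--
--     return list(common)
-- ===== SOURCE B (Python) =====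
-- from typing import List
--
-- def find_common_substrings(strings: List[str], min_length: int = 10) -> List[str]:
--     """Same result (as a set): precompute each other string's set of
--     length-min_length windows once, then test each window of the first
--     string by set membership, in first-occurrence order."""
--     if not strings:
--         return []
--     if len(strings) == 1:
--         return [strings[0]]
--
--     first = strings[0]
--     k = min_length
--     others = [
--         {s[i:i + k] for i in range(len(s) - k + 1)}
--         for s in strings[1:]
--     ]
--
--     seen = set()
--     out = []
--     for i in range(len(first) - k + 1):
--         sub = first[i:i + k]
--         if sub not in seen:
--             seen.add(sub)
--             if all(sub in windows for windows in others):
--                 out.append(sub)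
--     return out
-- ===== Notes on version B (the rewrite author's own statement) =====
-- stated objective: alternative
-- what changed: Instead of scanning every other string for each window of the first (repeated 'substring in s'), B precomputes each other string's set of length-min_length windows once and answers each membership query by a hash-set lookup, deduplicating first-occurrence windows in one pass; it trades A's C-level substring scans for Python-level set building, so it is not measurably faster at the tested sizes.
-- outside the precondition, e.g. on find_common_substrings(['c c ', 'a a'], -3): A returns ['', ' '], B returns ['']
import Mathlib
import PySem

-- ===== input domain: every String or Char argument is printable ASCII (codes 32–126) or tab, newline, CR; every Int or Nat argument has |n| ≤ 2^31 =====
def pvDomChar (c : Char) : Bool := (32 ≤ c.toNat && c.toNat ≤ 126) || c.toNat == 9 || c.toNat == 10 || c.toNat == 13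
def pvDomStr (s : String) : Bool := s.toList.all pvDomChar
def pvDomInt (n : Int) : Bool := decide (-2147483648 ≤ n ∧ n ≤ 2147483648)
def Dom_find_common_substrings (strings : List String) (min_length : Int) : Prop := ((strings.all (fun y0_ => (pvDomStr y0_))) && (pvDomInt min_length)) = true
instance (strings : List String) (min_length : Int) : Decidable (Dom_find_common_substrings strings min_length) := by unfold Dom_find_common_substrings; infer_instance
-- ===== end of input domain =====

-- B replaces A's repeated 'substring in s' scans by per-string window sets built once
-- and hash-set membership, collecting the common windows in first-occurrence order
-- (an alternative algorithm; not measured faster at the tested sizes).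
-- A returns list(set(...)), whose Python iteration order is unspecified; return values are compared as sets.


-- ===== PORT A =====
def find_common_substrings (strings : List String) (min_length : Int) : List String :=
  if strings = [] then []
  else if strings.length = 1 then [strings.headD ""]
  else
    let first := strings.headD ""
    (PySem.List.pyRange 0 (PySem.Str.len first - min_length + 1) 1).foldl
      (fun (common : PySem.Set String) i =>
        let substring := PySem.Str.slice first (some i) (some (i + min_length))
        if (PySem.List.slice strings (some 1) none).all
            (fun s => PySem.Str.isIn substring s)
        then PySem.Set.add common substring else common)
      PySem.Set.empty

-- ===== PORT B =====
-- the set comprehension {s[i:i+k] for i in range(len(s)-k+1)} of Source B, before Set.ofList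
def pyWindows (s : String) (k : Int) : List String :=
  (PySem.List.pyRange 0 (PySem.Str.len s - k + 1) 1).map
    (fun i => PySem.Str.slice s (some i) (some (i + k)))

def find_common_substrings_alt (strings : List String) (min_length : Int) : List String :=
  if strings = [] then []
  else if strings.length = 1 then [strings.headD ""]
  else
    let first := strings.headD ""
    let others := (PySem.List.slice strings (some 1) none).map
      (fun s => PySem.Set.ofList (pyWindows s min_length))
    ((pyWindows first min_length).foldl
      (fun (st : PySem.Set String × List String) sub =>
        if PySem.Set.contains st.1 sub then st
        else (PySem.Set.add st.1 sub,
              if others.all (fun w => PySem.Set.contains w sub) then st.2 ++ [sub] else st.2))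
      (PySem.Set.empty, [])).2

-- ===== PRECONDITION & SPEC =====
-- Pre_ excludes negative min_length, outside the natural domain of a minimum-length
-- parameter, where A's slice first[i:i+min_length] hits Python's negative-index
-- wraparound and returns accidental fragments of varying lengths.
def Pre_find_common_substrings (strings : List String) (min_length : Int) : Prop :=
  0 ≤ min_length
instance (strings : List String) (min_length : Int) : Decidable (Pre_find_common_substrings strings min_length) := by unfold Pre_find_common_substrings; infer_instance

def pvWitness_find_common_substrings : List String × Int := (["abc", "xbcx"], 2)

def Spec_find_common_substrings (strings : List String) (min_length : Int) (out : List String) : Prop := out = find_common_substrings_alt strings min_length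
instance (strings : List String) (min_length : Int) (out : List String) : Decidable (Spec_find_common_substrings strings min_length out) := by unfold Spec_find_common_substrings; infer_instance

-- ===== CLAIM (what is proved, stated in full; the proofs are below) =====
def Claim_equal_find_common_substrings : Prop := ∀ (strings : List String) (min_length : Int), Dom_find_common_substrings strings min_length → Pre_find_common_substrings strings min_length → Spec_find_common_substrings strings min_length (find_common_substrings strings min_length)

-- ===== LEMMAS AND PROOFS =====

-- a list of fixed length k is an infix of L iff it is one of L's length-k windows
lemma infix_iff_window (L t : List Char) (k : Nat) (ht : t.length = k) :
    t <:+: L ↔ ∃ j : Nat, j + k ≤ L.length ∧ (L.drop j).take k = t := by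
  constructor
  · rintro ⟨u, v, rfl⟩
    refine ⟨u.length, by simp [← ht], ?_⟩
    rw [List.append_assoc, List.drop_left, ← ht, List.take_left]
  · rintro ⟨j, hj, rfl⟩
    exact ((L.drop j).take_prefix k).isInfix.trans (L.drop_suffix j).isInfix

-- membership in pyWindows, characterised through drop/take
lemma mem_pyWindows_iff (s : String) (k : Int) (hk : 0 ≤ k) (t : String) :
    t ∈ pyWindows s k ↔
      ∃ j : Nat, (j : Int) + k ≤ PySem.Str.len s ∧
        (s.toList.drop j).take k.toNat = t.toList := by
  simp only [pyWindows, List.mem_map, PySem.List.mem_pyRange_one]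
  constructor
  · rintro ⟨i, ⟨h0, hi⟩, rfl⟩
    refine ⟨i.toNat, ?_, ?_⟩
    · rw [PySem.Str.len_eq] at hi ⊢; omega
    · symm
      rw [PySem.Str.toList_slice, PySem.Chars.slice_eq_listSlice,
        PySem.List.slice_toNat _ h0 (by omega)]
      congr 1
      omega
  · rintro ⟨j, hj, ht⟩
    refine ⟨(j : Int), ⟨Int.natCast_nonneg j, by rw [PySem.Str.len_eq] at hj ⊢; omega⟩, ?_⟩
    rw [← String.toList_inj, PySem.Str.toList_slice, PySem.Chars.slice_eq_listSlice,
      PySem.List.slice_toNat _ (Int.natCast_nonneg j) (by omega), ← ht]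
    congr 1
    omega

-- a window of `first` occurs in `s` as a substring iff it is one of `s`'s windows
lemma isIn_eq_window_mem (first s : String) (k : Int) (hk : 0 ≤ k) (sub : String)
    (hsub : sub ∈ pyWindows first k) :
    PySem.Str.isIn sub s = PySem.Set.contains (PySem.Set.ofList (pyWindows s k)) sub := by
  obtain ⟨i, hlen, hs⟩ := (mem_pyWindows_iff first k hk sub).1 hsub
  have hlen' : (first.toList.length : Int) = PySem.Str.len first := (PySem.Str.len_eq first).symm
  have ht : sub.toList.length = k.toNat := by
    rw [← hs, List.length_take, List.length_drop]
    omega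
  rw [Bool.eq_iff_iff, PySem.Str.isIn_iff_infix]
  have hc : PySem.Set.contains (PySem.Set.ofList (pyWindows s k)) sub = true ↔ sub ∈ pyWindows s k := by
    simp [PySem.Set.contains, PySem.Set.mem_ofList]
  rw [hc, infix_iff_window s.toList sub.toList k.toNat ht, mem_pyWindows_iff s k hk sub]
  have hls : (s.toList.length : Int) = PySem.Str.len s := (PySem.Str.len_eq s).symm
  constructor
  · rintro ⟨j, hj, hjt⟩; exact ⟨j, by omega, hjt⟩
  · rintro ⟨j, hj, hjt⟩; exact ⟨j, by omega, hjt⟩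

-- the two folds agree: A keeps the set of accepted windows, B keeps (seen, accepted);
-- invariant: everything in c was seen, and for seen x, membership in c decides p x
lemma loop_eq {α : Type} [BEq α] [LawfulBEq α] (p q : α → Bool) :
    ∀ (ws : List α) (seen c : PySem.Set α),
      (∀ x ∈ ws, q x = p x) →
      (∀ x, x ∈ c → x ∈ seen) →
      (∀ x ∈ seen, PySem.Set.contains c x = p x) →
      ws.foldl (fun c sub => if p sub then PySem.Set.add c sub else c) c
        = (ws.foldl
            (fun (st : PySem.Set α × List α) sub =>
              if PySem.Set.contains st.1 sub then st
              else (PySem.Set.add st.1 sub,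
                    if q sub then st.2 ++ [sub] else st.2))
            (seen, c)).2
  | [], seen, c, hpq, hc, hs => rfl
  | sub :: ws, seen, c, hpq, hc, hs => by
    have hmems : ∀ (t : PySem.Set α) (x : α), PySem.Set.contains t x = true ↔ x ∈ t := by
      intro t x; simp [PySem.Set.contains]
    simp only [List.foldl_cons]
    by_cases hseen : PySem.Set.contains seen sub = true
    · rw [if_pos hseen]
      have hcs : (if p sub then PySem.Set.add c sub else c) = c := by
        by_cases hp : p sub = true
        · have hmem : sub ∈ c := (hmems c sub).1 (by rw [hs sub ((hmems seen sub).1 hseen)]; exact hp)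
          simp [hp, PySem.Set.add, hmem]
        · simp [hp]
      rw [hcs]
      exact loop_eq p q ws seen c (fun x hx => hpq x (List.mem_cons_of_mem _ hx)) hc hs
    · rw [if_neg hseen, hpq sub List.mem_cons_self]
      have hcsub : PySem.Set.contains c sub = false := by
        rw [← Bool.not_eq_true]
        intro h
        exact hseen ((hmems seen sub).2 (hc sub ((hmems c sub).1 h)))
      have hnmem : sub ∉ c := fun h =>
        absurd ((hmems c sub).2 h) (by rw [hcsub]; exact Bool.false_ne_true)
      have hadd : (if p sub then PySem.Set.add c sub else c)
          = (if p sub then c ++ [sub] else c) := by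
        by_cases hp : p sub = true <;> simp [hp, PySem.Set.add, hnmem]
      rw [hadd]
      refine loop_eq p q ws (PySem.Set.add seen sub) (if p sub then c ++ [sub] else c)
        (fun x hx => hpq x (List.mem_cons_of_mem _ hx)) ?_ ?_
      · intro x hx
        rw [PySem.Set.mem_add]
        by_cases hp : p sub = true
        · rw [if_pos hp] at hx
          rcases List.mem_append.1 hx with h | h
          · exact Or.inl (hc x h)
          · exact Or.inr (List.mem_singleton.1 h)
        · rw [if_neg hp] at hx
          exact Or.inl (hc x hx)
      · intro x hx
        rcases (PySem.Set.mem_add seen sub x).1 hx with hxs | rfl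
        · have hne : x ≠ sub := fun h => hseen ((hmems seen sub).2 (h ▸ hxs))
          have hsw : PySem.Set.contains (if p sub then c ++ [sub] else c) x
              = PySem.Set.contains c x := by
            by_cases hp : p sub = true <;>
              simp [hp, PySem.Set.contains, List.mem_append, hne]
          rw [hsw, hs x hxs]
        · by_cases hp : p x = true
          · simp [hp, PySem.Set.contains, List.mem_append]
          · have hpf : p x = false := by simpa using hp
            rw [if_neg hp, hcsub, hpf]

-- A's range loop over the first string equals B's (seen, out) loop over its windows
lemma main_fold (first : String) (rest : List String) (k : Int) (hk : 0 ≤ k) :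
    (PySem.List.pyRange 0 (PySem.Str.len first - k + 1) 1).foldl
      (fun (common : PySem.Set String) i =>
        let substring := PySem.Str.slice first (some i) (some (i + k))
        if rest.all (fun s => PySem.Str.isIn substring s)
        then PySem.Set.add common substring else common)
      PySem.Set.empty
    = ((pyWindows first k).foldl
        (fun (st : PySem.Set String × List String) sub =>
          if PySem.Set.contains st.1 sub then st
          else (PySem.Set.add st.1 sub,
                if (rest.map (fun s => PySem.Set.ofList (pyWindows s k))).all
                    (fun w => PySem.Set.contains w sub)
                then st.2 ++ [sub] else st.2))
        (PySem.Set.empty, [])).2 := by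
  have h1 : (PySem.List.pyRange 0 (PySem.Str.len first - k + 1) 1).foldl
      (fun (common : PySem.Set String) i =>
        let substring := PySem.Str.slice first (some i) (some (i + k))
        if rest.all (fun s => PySem.Str.isIn substring s)
        then PySem.Set.add common substring else common)
      PySem.Set.empty
      = (pyWindows first k).foldl
        (fun (common : PySem.Set String) sub =>
          if rest.all (fun s => PySem.Str.isIn sub s)
          then PySem.Set.add common sub else common)
        PySem.Set.empty := by
    rw [pyWindows, List.foldl_map]
  rw [h1]
  apply loop_eq
  · intro sub hsub
    rw [List.all_map]
    congr 1
    funext s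
    exact (isIn_eq_window_mem first s k hk sub hsub).symm
  · intro x hx
    exact absurd hx (List.not_mem_nil)
  · intro x hx
    exact absurd hx (List.not_mem_nil)

-- ===== VERDICT (by name: the statement is the Claim_ definition above) =====
theorem find_common_substrings_spec : Claim_equal_find_common_substrings := by
  intro strings min_length _hdom hpre
  unfold Spec_find_common_substrings
  by_cases h1 : strings = []
  · simp [find_common_substrings, find_common_substrings_alt, h1]
  · by_cases h2 : strings.length = 1
    · simp [find_common_substrings, find_common_substrings_alt, h1, h2]
    · simp only [find_common_substrings, find_common_substrings_alt, if_neg h1, if_neg h2]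
      exact main_fold (strings.headD "") (PySem.List.slice strings (some 1) none) min_length hpre
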